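-- pv_equiv track=rewrite | github.com/meryemposul/Interpreter-Python | posu.py | split_expression
-- ===== SOURCE A (Python) =====
-- def split_expression(condition, operators):
--     current_term = ""
--     terms = []
--     for char in condition:
--         if char in operators:
--             terms.append(current_term)
--             terms.append(char)
--             current_term = ""
--         else:
--             current_term += char
--     terms.append(current_term)
--
--     return terms
-- ===== SOURCE B (Python) =====
-- def split_expression(condition, operators):
--     ops = frozenset(operators)
--     parts = [""]
--     for ch in reversed(condition):
--         if ch in ops:
--             parts.append(ch)
--             parts.append("")
--         else:
--             parts[-1] = ch + parts[-1]
--     parts.reverse()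
--     return parts
-- ===== Notes on version B (the rewrite author's own statement) =====
-- stated objective: alternative
-- what changed: B builds the token list back-to-front: it scans the condition right-to-left, extending the current (leftmost-so-far) token in place and pushing finished tokens, then reverses once, with operator membership via a frozenset instead of A's left-to-right accumulator with repeated string-membership tests.
import Mathlib
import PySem

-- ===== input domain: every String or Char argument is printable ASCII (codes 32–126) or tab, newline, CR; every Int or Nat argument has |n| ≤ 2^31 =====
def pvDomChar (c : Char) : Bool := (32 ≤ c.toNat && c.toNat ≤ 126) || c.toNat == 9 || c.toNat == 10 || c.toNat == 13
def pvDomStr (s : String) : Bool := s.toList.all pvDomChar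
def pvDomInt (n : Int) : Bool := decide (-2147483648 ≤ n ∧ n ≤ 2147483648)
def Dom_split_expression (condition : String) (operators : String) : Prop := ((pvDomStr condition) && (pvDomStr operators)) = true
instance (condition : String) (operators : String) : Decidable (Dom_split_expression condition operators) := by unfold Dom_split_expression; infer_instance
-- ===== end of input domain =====

-- ===== PORT A =====
-- B builds the token list back-to-front (right-to-left scan, reverse once) instead of A's
-- left-to-right accumulator; equivalence of return values is proved on all inputs.
def split_expression (condition : String) (operators : String) : List String :=
  -- literal port of A: current_term grows by 'current_term += char', terms by two appends
  let p := condition.toList.foldl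
    (fun (st : List Char × List String) (c : Char) =>
      if operators.toList.contains c then
        ([], st.2 ++ [String.ofList st.1, String.ofList [c]])
      else
        (st.1 ++ [c], st.2))
    ([], [])
  p.2 ++ [String.ofList p.1]

-- ===== PORT B =====
-- port of Source B; the Python list 'parts' (append at end, mutate last) is modelled in
-- reverse order (head = Python's last element), so Python's final 'parts.reverse()'
-- is the identity on this representation.
def split_expression_alt (condition : String) (operators : String) : List String :=
  let ops : PySem.Set Char := PySem.Set.ofList operators.toList
  let parts := condition.toList.reverse.foldl
    (fun (parts : List (List Char)) (c : Char) =>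
      if PySem.Set.contains ops c then
        [] :: [c] :: parts
      else
        match parts with
        | p :: rest => (c :: p) :: rest
        | [] => [])          -- unreachable: parts starts nonempty and stays nonempty
    [[]]
  parts.map (fun p => String.ofList p)

-- ===== PRECONDITION & SPEC =====
def Spec_split_expression (condition : String) (operators : String) (out : List String) : Prop := out = split_expression_alt condition operators
instance (condition : String) (operators : String) (out : List String) : Decidable (Spec_split_expression condition operators out) := by unfold Spec_split_expression; infer_instance

-- ===== CLAIM (what is proved, stated in full; the proofs are below) =====
def Claim_equal_split_expression : Prop := ∀ (condition : String) (operators : String), Dom_split_expression condition operators → Spec_split_expression condition operators (split_expression condition operators)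

-- ===== LEMMAS AND PROOFS =====

-- A's loop body, named for the proofs
def stepA (ops : List Char) (st : List Char × List String) (c : Char) : List Char × List String :=
  if ops.contains c then
    ([], st.2 ++ [String.ofList st.1, String.ofList [c]])
  else
    (st.1 ++ [c], st.2)

lemma split_expression_eq (condition operators : String) :
    split_expression condition operators =
      (condition.toList.foldl (stepA operators.toList) ([], [])).2 ++
        [String.ofList (condition.toList.foldl (stepA operators.toList) ([], [])).1] := rfl

-- B's core, rewritten as a foldr over the char list (foldl over the reverse).
def tokB (ops : List Char) : List Char → List (List Char)
  | [] => [[]]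
  | c :: cs =>
      if ops.contains c then
        [] :: [c] :: tokB ops cs
      else
        match tokB ops cs with
        | p :: rest => (c :: p) :: rest
        | [] => []

lemma tokB_ne_nil (ops : List Char) (cs : List Char) : tokB ops cs ≠ [] := by
  induction cs with
  | nil => simp [tokB]
  | cons c cs ih =>
    simp only [tokB]
    split
    · simp
    · cases h : tokB ops cs with
      | nil => exact absurd h ih
      | cons p rest => simp

lemma altB_eq_tokB (condition operators : String) :
    split_expression_alt condition operators =
      (tokB operators.toList condition.toList).map (fun p => String.ofList p) := by
  show (condition.toList.reverse.foldl
      (fun (parts : List (List Char)) (c : Char) =>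
        if PySem.Set.contains (PySem.Set.ofList operators.toList) c then
          [] :: [c] :: parts
        else
          match parts with
          | p :: rest => (c :: p) :: rest
          | [] => [])
      [[]]).map (fun p => String.ofList p) =
    (tokB operators.toList condition.toList).map (fun p => String.ofList p)
  rw [List.foldl_reverse]
  congr 1
  induction condition.toList with
  | nil => rfl
  | cons c cs ih =>
    rw [List.foldr_cons, ih]
    simp only [tokB, PySem.Set.contains_eq_listContains, PySem.Set.mem_ofList,
      List.contains_eq_mem]

-- prepend cur onto the first token
def consHead (cur : List Char) : List (List Char) → List (List Char)
  | p :: rest => (cur ++ p) :: rest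
  | [] => [cur]

-- invariant of A's left fold against tokB
lemma loopA_eq (ops : List Char) (cs cur : List Char) (terms : List String) :
    (cs.foldl (stepA ops) (cur, terms)).2 ++
        [String.ofList (cs.foldl (stepA ops) (cur, terms)).1] =
      terms ++ (consHead cur (tokB ops cs)).map (fun p => String.ofList p) := by
  induction cs generalizing cur terms with
  | nil => simp [tokB, consHead]
  | cons c cs ih =>
    simp only [List.foldl_cons, tokB, stepA]
    by_cases h : ops.contains c = true
    · simp only [h, if_true, ih]
      cases htk : tokB ops cs with
      | nil => exact absurd htk (tokB_ne_nil ops cs)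
      | cons p rest => simp [consHead]
    · simp only [h, ih]
      cases htk : tokB ops cs with
      | nil => exact absurd htk (tokB_ne_nil ops cs)
      | cons p rest => simp [consHead]

-- ===== VERDICT (by name: the statement is the Claim_ definition above) =====
theorem split_expression_spec : Claim_equal_split_expression := by
  intro condition operators _
  unfold Spec_split_expression
  rw [altB_eq_tokB, split_expression_eq, loopA_eq]
  cases htk : tokB operators.toList condition.toList with
  | nil => exact absurd htk (tokB_ne_nil _ _)
  | cons p rest => simp [consHead]
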